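-- pv_equiv track=rewrite | github.com/aalvarez122/TopoRx | toporx/visualization/toporx/visualization/toporx/toporx/data/toporx/data/loader.py | _count_tme_genes
-- ===== SOURCE A (Python) =====
-- def _count_tme_genes(gene_names: list) -> int:
--     """Count TME-related genes in the selection."""
--     tme_genes = {
--         'FAP', 'ACTA2', 'PDGFRB', 'S100A4', 'PDPN', 'COL1A1', 'COL3A1',
--         'CD8A', 'CD8B', 'CD4', 'CD3D', 'CD3E', 'FOXP3', 'GZMB', 'PRF1',
--         'CD68', 'CD163', 'CSF1R', 'MARCO', 'MRC1', 'CD14',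
--         'CD274', 'PDCD1', 'CTLA4', 'LAG3', 'HAVCR2', 'TIGIT', 'IDO1',
--         'TGFB1', 'TGFB2', 'IL10', 'IL6', 'CXCL12', 'CCL2',
--         'HLA-A', 'HLA-B', 'HLA-C', 'B2M', 'TAP1', 'TAP2'
--     }
--     return sum(1 for g in gene_names if g in tme_genes)
-- ===== SOURCE B (Python) =====
-- def _count_tme_genes(gene_names: list) -> int:
--     """Count TME-related genes by scanning for each fixed gene in turn."""
--     tme_genes = (
--         "FAP ACTA2 PDGFRB S100A4 PDPN COL1A1 COL3A1 "
--         "CD8A CD8B CD4 CD3D CD3E FOXP3 GZMB PRF1 "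
--         "CD68 CD163 CSF1R MARCO MRC1 CD14 "
--         "CD274 PDCD1 CTLA4 LAG3 HAVCR2 TIGIT IDO1 "
--         "TGFB1 TGFB2 IL10 IL6 CXCL12 CCL2 "
--         "HLA-A HLA-B HLA-C B2M TAP1 TAP2"
--     ).split()
--     return sum(gene_names.count(g) for g in tme_genes)
-- ===== Notes on version B (the rewrite author's own statement) =====
-- stated objective: alternative
-- what changed: B stores the TME genes as one whitespace-separated string, splits it, and sums gene_names.count(g) per fixed gene, inverting A's single membership-filtering pass over the input.
import Mathlib
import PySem

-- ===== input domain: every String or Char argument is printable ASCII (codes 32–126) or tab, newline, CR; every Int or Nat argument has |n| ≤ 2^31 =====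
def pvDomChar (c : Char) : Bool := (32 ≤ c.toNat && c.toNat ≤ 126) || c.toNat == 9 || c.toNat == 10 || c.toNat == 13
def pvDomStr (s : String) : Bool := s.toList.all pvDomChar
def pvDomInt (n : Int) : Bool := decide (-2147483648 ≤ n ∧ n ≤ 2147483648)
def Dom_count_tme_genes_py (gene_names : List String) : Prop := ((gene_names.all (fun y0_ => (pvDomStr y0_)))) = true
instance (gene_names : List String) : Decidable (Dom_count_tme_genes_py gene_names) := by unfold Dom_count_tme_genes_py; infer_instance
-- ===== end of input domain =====

-- B stores the TME genes as one whitespace-separated string, splits it, and sums per-gene counts (alternative decomposition, same cost).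

-- ===== PORT A =====
-- A's set literal of TME genes
def tmeGenesA : PySem.Set String := PySem.Set.ofList
  ["FAP", "ACTA2", "PDGFRB", "S100A4", "PDPN", "COL1A1", "COL3A1",
   "CD8A", "CD8B", "CD4", "CD3D", "CD3E", "FOXP3", "GZMB", "PRF1",
   "CD68", "CD163", "CSF1R", "MARCO", "MRC1", "CD14",
   "CD274", "PDCD1", "CTLA4", "LAG3", "HAVCR2", "TIGIT", "IDO1",
   "TGFB1", "TGFB2", "IL10", "IL6", "CXCL12", "CCL2",
   "HLA-A", "HLA-B", "HLA-C", "B2M", "TAP1", "TAP2"]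

-- sum(1 for g in gene_names if g in tme_genes)
def count_tme_genes_py (gene_names : List String) : Int :=
  gene_names.foldl (fun acc g => if PySem.Set.contains tmeGenesA g then acc + 1 else acc) 0

-- ===== PORT B =====
-- B's whitespace-separated gene string, split with str.split()
def tmeGenesStr : String :=
  "FAP ACTA2 PDGFRB S100A4 PDPN COL1A1 COL3A1 CD8A CD8B CD4 CD3D CD3E FOXP3 GZMB PRF1 CD68 CD163 CSF1R MARCO MRC1 CD14 CD274 PDCD1 CTLA4 LAG3 HAVCR2 TIGIT IDO1 TGFB1 TGFB2 IL10 IL6 CXCL12 CCL2 HLA-A HLA-B HLA-C B2M TAP1 TAP2"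

-- sum(gene_names.count(g) for g in tme_genes)
def count_tme_genes_py_alt (gene_names : List String) : Int :=
  (PySem.Str.split₀ tmeGenesStr).foldl (fun acc g => acc + (gene_names.count g : Int)) 0

-- ===== PRECONDITION & SPEC =====
def Spec_count_tme_genes_py (gene_names : List String) (out : Int) : Prop := out = count_tme_genes_py_alt gene_names
instance (gene_names : List String) (out : Int) : Decidable (Spec_count_tme_genes_py gene_names out) := by unfold Spec_count_tme_genes_py; infer_instance

-- ===== CLAIM (what is proved, stated in full; the proofs are below) =====
def Claim_equal_count_tme_genes_py : Prop := ∀ (gene_names : List String), Dom_count_tme_genes_py gene_names → Spec_count_tme_genes_py gene_names (count_tme_genes_py gene_names)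

-- ===== LEMMAS AND PROOFS =====

-- Filtering gs by membership in a duplicate-free list tme counts the same
-- genes as summing, over tme, each gene's multiplicity in gs.
lemma countP_mem_eq_sum_counts (tme : List String) (hnd : tme.Nodup) (gs : List String) :
    (gs.countP (fun g => tme.contains g) : Int)
      = (tme.map (fun g => (gs.count g : Int))).sum := by
  induction gs with
  | nil => simp
  | cons x gs ih =>
    have hsplit : (tme.map (fun g => ((x :: gs).count g : Int))).sum
        = (tme.map (fun g => (gs.count g : Int))).sum
          + (tme.map (fun g => if g == x then (1 : Int) else 0)).sum := by
      rw [← PySem.List.sum_map_add_int]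
      refine congrArg List.sum (List.map_congr_left ?_)
      intro g _
      rw [List.count_cons]
      by_cases h : g = x
      · simp [h]
      · simp [h]
        exact fun he => h he.symm
    have hone : (tme.map (fun g => if g == x then (1 : Int) else 0)).sum
        = if tme.contains x then 1 else 0 := by
      rw [PySem.List.sum_map_ite_one_zero, ← List.count_eq_countP]
      by_cases hx : x ∈ tme
      · simp [List.count_eq_one_of_mem hnd hx, hx]
      · simp [List.count_eq_zero_of_not_mem hx, hx]
    rw [hsplit, hone, List.countP_cons]
    push_cast
    rw [ih]

set_option maxRecDepth 20000 in
-- ===== VERDICT (by name: the statement is the Claim_ definition above) =====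
theorem count_tme_genes_py_spec : Claim_equal_count_tme_genes_py := by
  intro gene_names _
  unfold Spec_count_tme_genes_py count_tme_genes_py count_tme_genes_py_alt
  rw [PySem.List.foldl_if_add_one, PySem.List.foldl_add]
  simp only [zero_add]
  have hAB : (tmeGenesA : List String) = PySem.Str.split₀ tmeGenesStr := by decide
  have hnd : (PySem.Str.split₀ tmeGenesStr).Nodup := by decide
  rw [hAB]
  have := countP_mem_eq_sum_counts (PySem.Str.split₀ tmeGenesStr) hnd gene_names
  exact this
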